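-- pv_equiv track=rewrite | github.com/othero/othero | othero/core.py | countSOSs
-- ===== SOURCE A (Python) =====
-- import enum
--
-- class SOS(enum.IntEnum):
--     """
--     State of squares(SOS)
--     """
--     DARK  =  1
--     LIGHT = -1
--     BLANK =  0
--
-- def countSOSs(sog):
--     """
--     Count the number of each sos in the <sog>.
--
--     Args:
--         sog [[othero.core.SOS]]:
--             State of the game.
--
--     Returns:
--         int:
--             The number of othero.core.SOS.DARK in <sog>.
--
--         int:
--             The number of othero.core.SOS.LIGHT in <sog>.
--
--         int:
--             The number of othero.core.SOS.BLANK in <sog>.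
--     """
--     ndark, nlight, nblank = 0, 0, 0
--     for row in sog:
--         for sos in row:
--             if sos == SOS.DARK:
--                 ndark = ndark + 1
--             elif sos == SOS.LIGHT:
--                 nlight = nlight + 1
--             else:
--                 nblank = nblank + 1
--     return ndark, nlight, nblank
-- ===== SOURCE B (Python) =====
-- def countSOSs(sog):
--     flat = [sos for row in sog for sos in row]
--     ndark = flat.count(1)
--     nlight = flat.count(-1)
--     return ndark, nlight, len(flat) - ndark - nlight
-- ===== Notes on version B (the rewrite author's own statement) =====
-- stated objective: faster
-- what changed: Replaces the per-element if/elif/else counting loop with flattening the grid once and tabulating frequencies via list.count (C-level scans), computing the blank bucket by subtraction so it absorbs every non-dark/non-light value exactly as A's else branch does.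
import Mathlib
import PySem

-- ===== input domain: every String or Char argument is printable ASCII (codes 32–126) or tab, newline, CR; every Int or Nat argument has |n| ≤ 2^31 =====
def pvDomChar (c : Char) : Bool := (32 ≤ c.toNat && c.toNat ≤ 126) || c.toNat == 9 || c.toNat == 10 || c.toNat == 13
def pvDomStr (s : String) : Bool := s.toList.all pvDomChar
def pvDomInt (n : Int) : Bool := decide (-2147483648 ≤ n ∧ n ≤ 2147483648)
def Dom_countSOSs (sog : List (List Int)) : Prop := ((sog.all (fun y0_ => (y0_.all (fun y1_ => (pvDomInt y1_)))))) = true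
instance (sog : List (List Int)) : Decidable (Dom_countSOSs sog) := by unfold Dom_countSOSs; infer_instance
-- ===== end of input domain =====

-- B flattens the grid once and counts 1s and -1s, taking blanks by subtraction, replacing A's per-element if/elif/else tally loop (objective: faster, measured).

-- ===== PORT A =====
def countSOSs (sog : List (List Int)) : Int × Int × Int :=
  sog.foldl
    (fun st row =>
      row.foldl
        (fun (st : Int × Int × Int) sos =>
          if sos = 1 then (st.1 + 1, st.2.1, st.2.2)
          else if sos = -1 then (st.1, st.2.1 + 1, st.2.2)
          else (st.1, st.2.1, st.2.2 + 1))
        st)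
    (0, 0, 0)

-- ===== PORT B =====
def countSOSs_alt (sog : List (List Int)) : Int × Int × Int :=
  let flat := sog.flatMap (fun row => row)
  let ndark : Int := flat.count 1
  let nlight : Int := flat.count (-1)
  (ndark, nlight, (flat.length : Int) - ndark - nlight)

-- ===== PRECONDITION & SPEC =====
def Spec_countSOSs (sog : List (List Int)) (out : Int × Int × Int) : Prop := out = countSOSs_alt sog
instance (sog : List (List Int)) (out : Int × Int × Int) : Decidable (Spec_countSOSs sog out) := by unfold Spec_countSOSs; infer_instance

-- ===== CLAIM (what is proved, stated in full; the proofs are below) =====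
def Claim_equal_countSOSs : Prop := ∀ (sog : List (List Int)), Dom_countSOSs sog → Spec_countSOSs sog (countSOSs sog)

-- ===== LEMMAS AND PROOFS =====

-- A's state-update step, named for the proofs.
def pvStep (st : Int × Int × Int) (sos : Int) : Int × Int × Int :=
  if sos = 1 then (st.1 + 1, st.2.1, st.2.2)
  else if sos = -1 then (st.1, st.2.1 + 1, st.2.2)
  else (st.1, st.2.1, st.2.2 + 1)

-- A's nested loop equals one fold over the flattened list.
lemma foldl_nested_eq_flat (sog : List (List Int)) (st : Int × Int × Int) :
    sog.foldl (fun st row => row.foldl pvStep st) st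
      = (sog.flatMap (fun row => row)).foldl pvStep st := by
  induction sog generalizing st with
  | nil => rfl
  | cons r t ih => simp [List.foldl_append, ih]

lemma countSOSs_eq_foldl_flat (sog : List (List Int)) :
    countSOSs sog = (sog.flatMap (fun row => row)).foldl pvStep (0, 0, 0) :=
  foldl_nested_eq_flat sog (0, 0, 0)

-- Characterisation of A's fold over any flat list, with a general accumulator.
lemma foldl_pvStep (l : List Int) (st : Int × Int × Int) :
    l.foldl pvStep st =
      (st.1 + (l.count 1 : Int), st.2.1 + (l.count (-1) : Int),
       st.2.2 + ((l.length : Int) - (l.count 1 : Int) - (l.count (-1) : Int))) := by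
  induction l generalizing st with
  | nil => simp
  | cons x t ih =>
    by_cases h1 : x = 1
    · subst h1
      simp [List.foldl_cons, ih, pvStep, Prod.ext_iff]
      omega
    · by_cases h2 : x = -1
      · subst h2
        simp [List.foldl_cons, ih, pvStep, Prod.ext_iff]
        omega
      · simp [List.foldl_cons, ih, pvStep, h1, h2, Prod.ext_iff]
        omega

-- ===== VERDICT (by name: the statement is the Claim_ definition above) =====
theorem countSOSs_spec : Claim_equal_countSOSs := by
  intro sog _
  show countSOSs sog = countSOSs_alt sog
  rw [countSOSs_eq_foldl_flat, foldl_pvStep]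
  simp [countSOSs_alt]
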